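-- pv_equiv track=rewrite | github.com/bwisniewski44/AOC2021 | 14/14.py | diff_optima
-- ===== SOURCE A (Python) =====
-- def diff_optima(tallies_by_element):
--     """
--     Gives the difference in population between the most- and least-populous elements in the tally.
--
--     :param dict[str, int] tallies_by_element:
--
--     :return:
--     :rtype: int
--     """
--
--     if len(tallies_by_element) < 2:
--         raise ValueError(f"Expecting to diff two populations; found only {len(tallies_by_element)}")
--
--     max_tally = max(tally for _, tally in tallies_by_element.items())
--     min_tally = min(tally for _, tally in tallies_by_element.items())
--
--     top_populations = set(key for key, tally in tallies_by_element.items() if tally == max_tally)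
--     bottom_populations = set(key for key, tally in tallies_by_element.items() if tally == min_tally)
--
--     if len(top_populations) != 1:
--         raise \
--             ValueError(
--                 f"Expecting to find a single, authoritative maximum population; found {len(top_populations)}: "
--                 f"{', '.join(top_populations)}"
--             )
--     elif len(bottom_populations) != 1:
--         raise \
--             ValueError(
--                 f"Expecting to find a single, authoritative minimum population; found {len(bottom_populations)}: "
--                 f"{', '.join(bottom_populations)}"
--             )
--
--     difference = max_tally - min_tally
--     return difference
-- ===== SOURCE B (Python) =====
-- def diff_optima(tallies_by_element):
--     """
--     Gives the difference in population between the most- and least-populous elements in the tally,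
--     in a single pass over the values (no max/min builtins, no key sets).
--
--     :param dict[str, int] tallies_by_element:
--     :rtype: int
--     """
--     if len(tallies_by_element) < 2:
--         raise ValueError(f"Expecting to diff two populations; found only {len(tallies_by_element)}")
--
--     max_tally = min_tally = 0
--     n_max = n_min = 0
--     for tally in tallies_by_element.values():
--         if n_max == 0 or tally > max_tally:
--             max_tally, n_max = tally, 1
--         elif tally == max_tally:
--             n_max += 1
--         if n_min == 0 or tally < min_tally:
--             min_tally, n_min = tally, 1
--         elif tally == min_tally:
--             n_min += 1
--
--     if n_max != 1:
--         raise ValueError(f"Expecting to find a single, authoritative maximum population; found {n_max}")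
--     if n_min != 1:
--         raise ValueError(f"Expecting to find a single, authoritative minimum population; found {n_min}")
--
--     return max_tally - min_tally
-- ===== Notes on version B (the rewrite author's own statement) =====
-- stated objective: alternative
-- what changed: Replaces A's four separate O(n) scans (max, min, and two set-building comprehensions over the keys) by one fold over the values that maintains the running max/min together with a count of how many entries currently achieve each extreme.
import Mathlib
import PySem

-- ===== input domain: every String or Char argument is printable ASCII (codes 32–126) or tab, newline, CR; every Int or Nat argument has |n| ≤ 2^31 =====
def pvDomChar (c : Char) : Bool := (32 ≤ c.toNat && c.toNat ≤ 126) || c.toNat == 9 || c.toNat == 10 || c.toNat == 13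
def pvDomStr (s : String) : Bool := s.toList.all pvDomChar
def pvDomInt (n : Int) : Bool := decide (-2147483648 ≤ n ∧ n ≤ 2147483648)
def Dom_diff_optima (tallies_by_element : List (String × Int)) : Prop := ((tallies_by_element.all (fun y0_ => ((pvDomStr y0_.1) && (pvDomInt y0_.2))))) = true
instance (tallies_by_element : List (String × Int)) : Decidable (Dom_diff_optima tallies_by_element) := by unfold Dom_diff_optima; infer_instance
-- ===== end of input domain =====

-- B replaces A's four separate scans (max, min, two key-set comprehensions) by one fold over the
-- values maintaining the running max/min and a count of entries achieving each extreme (alternative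
-- decomposition, same O(n) cost).


-- ===== PORT A =====
-- Literal port of A: where the Python raises ValueError (fewer than two entries, tied max, tied
-- min) the port returns 0; those inputs are excluded by Pre_diff_optima.
def diff_optima (tallies_by_element : List (String × Int)) : Int :=
  if tallies_by_element.length < 2 then 0
  else
    match PySem.List.max? (tallies_by_element.map Prod.snd) (fun v => v),
          PySem.List.min? (tallies_by_element.map Prod.snd) (fun v => v) with
    | some max_tally, some min_tally =>
        let top_populations : PySem.Set String :=
          PySem.Set.ofList ((tallies_by_element.filter (fun p => p.2 == max_tally)).map Prod.fst)
        let bottom_populations : PySem.Set String :=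
          PySem.Set.ofList ((tallies_by_element.filter (fun p => p.2 == min_tally)).map Prod.fst)
        if top_populations.length ≠ 1 then 0
        else if bottom_populations.length ≠ 1 then 0
        else max_tally - min_tally
    | _, _ => 0

-- ===== PORT B =====
-- state (max_tally, n_max): 'if n_max == 0 or tally > max_tally: … elif tally == max_tally: …'
def pvMaxStep (s : Int × Int) (tally : Int) : Int × Int :=
  if s.2 == 0 || decide (tally > s.1) then (tally, 1)
  else if tally == s.1 then (s.1, s.2 + 1)
  else s

-- state (min_tally, n_min)
def pvMinStep (s : Int × Int) (tally : Int) : Int × Int :=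
  if s.2 == 0 || decide (tally < s.1) then (tally, 1)
  else if tally == s.1 then (s.1, s.2 + 1)
  else s

def diff_optima_alt (tallies_by_element : List (String × Int)) : Int :=
  if tallies_by_element.length < 2 then 0
  else
    let r := (tallies_by_element.map Prod.snd).foldl
      (fun s tally => (pvMaxStep s.1 tally, pvMinStep s.2 tally)) ((0, 0), (0, 0))
    if r.1.2 ≠ 1 then 0
    else if r.2.2 ≠ 1 then 0
    else r.1.1 - r.2.1

-- ===== PRECONDITION & SPEC =====
-- Pre_ excludes exactly the inputs where the Python A raises ValueError: fewer than two entries, a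
-- tied maximum, or a tied minimum; the Nodup conjunct only states that the argument models a dict
-- (distinct keys), which every actual Python argument satisfies.
def Pre_diff_optima (tallies_by_element : List (String × Int)) : Prop :=
  (tallies_by_element.map Prod.fst).Nodup ∧ 2 ≤ tallies_by_element.length ∧
  (tallies_by_element.map Prod.snd).countP
    (fun v => decide (∀ w ∈ tallies_by_element.map Prod.snd, w ≤ v)) = 1 ∧
  (tallies_by_element.map Prod.snd).countP
    (fun v => decide (∀ w ∈ tallies_by_element.map Prod.snd, v ≤ w)) = 1
instance (tallies_by_element : List (String × Int)) : Decidable (Pre_diff_optima tallies_by_element) := by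
  unfold Pre_diff_optima; infer_instance

def pvWitness_diff_optima : (List (String × Int)) := [("a", 1), ("b", 2)]

def Spec_diff_optima (tallies_by_element : List (String × Int)) (out : Int) : Prop := out = diff_optima_alt tallies_by_element
instance (tallies_by_element : List (String × Int)) (out : Int) : Decidable (Spec_diff_optima tallies_by_element out) := by unfold Spec_diff_optima; infer_instance

-- ===== CLAIM (what is proved, stated in full; the proofs are below) =====
def Claim_equal_diff_optima : Prop := ∀ (tallies_by_element : List (String × Int)), Dom_diff_optima tallies_by_element → Pre_diff_optima tallies_by_element → Spec_diff_optima tallies_by_element (diff_optima tallies_by_element)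

-- ===== LEMMAS AND PROOFS =====

-- After the seed step, n_max is never 0, and the fold computes the running max together with the
-- multiplicity of that max among the values seen so far.
theorem pvMaxStep_foldl (l : List Int) (M cM : Int) (h : 0 < cM) :
    l.foldl pvMaxStep (M, cM) =
      (l.foldl max M,
       (l.count (l.foldl max M) : Int) + if M = l.foldl max M then cM else 0) := by
  induction l generalizing M cM with
  | nil => simp
  | cons a l ih =>
    simp only [List.foldl_cons]
    have hstep : pvMaxStep (M, cM) a =
        if a > M then (a, 1) else if a = M then (M, cM + 1) else (M, cM) := by
      have h0 : (cM == 0) = false := by simp; omega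
      simp [pvMaxStep, h0]
    rw [hstep]
    by_cases hgt : a > M
    · have hmax : max M a = a := by omega
      rw [if_pos hgt]
      simp only [hmax]
      rw [ih a 1 one_pos]
      have hle : a ≤ l.foldl max a := (PySem.List.le_foldl_max l a).1
      have hne : M ≠ l.foldl max a := by omega
      simp only [Prod.mk.injEq, true_and, List.count_cons, beq_iff_eq, if_neg hne]
      split_ifs <;> push_cast <;> omega
    · have hmax : max M a = M := by omega
      rw [if_neg hgt]
      simp only [hmax]
      by_cases heq : a = M
      · have h1 : 0 < cM + 1 := by omega
        rw [if_pos heq, ih M (cM + 1) h1]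
        subst heq
        simp only [Prod.mk.injEq, true_and, List.count_cons, beq_iff_eq]
        split_ifs <;> push_cast <;> omega
      · rw [if_neg heq, ih M cM h]
        have hle : M ≤ l.foldl max M := (PySem.List.le_foldl_max l M).1
        have hne : a ≠ l.foldl max M := by omega
        simp only [Prod.mk.injEq, true_and, List.count_cons, beq_iff_eq]
        split_ifs <;> push_cast <;> omega

theorem pvMinStep_foldl (l : List Int) (m cm : Int) (h : 0 < cm) :
    l.foldl pvMinStep (m, cm) =
      (l.foldl min m,
       (l.count (l.foldl min m) : Int) + if m = l.foldl min m then cm else 0) := by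
  induction l generalizing m cm with
  | nil => simp
  | cons a l ih =>
    simp only [List.foldl_cons]
    have hstep : pvMinStep (m, cm) a =
        if a < m then (a, 1) else if a = m then (m, cm + 1) else (m, cm) := by
      have h0 : (cm == 0) = false := by simp; omega
      simp [pvMinStep, h0]
    rw [hstep]
    by_cases hlt : a < m
    · have hmin : min m a = a := by omega
      rw [if_pos hlt]
      simp only [hmin]
      rw [ih a 1 one_pos]
      have hle : l.foldl min a ≤ a := (PySem.List.foldl_min_le l a).1
      have hne : m ≠ l.foldl min a := by omega
      simp only [Prod.mk.injEq, true_and, List.count_cons, beq_iff_eq, if_neg hne]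
      split_ifs <;> push_cast <;> omega
    · have hmin : min m a = m := by omega
      rw [if_neg hlt]
      simp only [hmin]
      by_cases heq : a = m
      · have h1 : 0 < cm + 1 := by omega
        rw [if_pos heq, ih m (cm + 1) h1]
        subst heq
        simp only [Prod.mk.injEq, true_and, List.count_cons, beq_iff_eq]
        split_ifs <;> push_cast <;> omega
      · rw [if_neg heq, ih m cm h]
        have hle : l.foldl min m ≤ m := (PySem.List.foldl_min_le l m).1
        have hne : a ≠ l.foldl min m := by omega
        simp only [Prod.mk.injEq, true_and, List.count_cons, beq_iff_eq]
        split_ifs <;> push_cast <;> omega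

-- A's key set for a value v has as many elements as v has occurrences among the values,
-- because the keys are distinct.
theorem pvTopLength (t : List (String × Int)) (hnd : (t.map Prod.fst).Nodup) (v : Int) :
    (PySem.Set.ofList ((t.filter (fun p => p.2 == v)).map Prod.fst)).length
      = (t.map Prod.snd).count v := by
  have hsub : ((t.filter (fun p => p.2 == v)).map Prod.fst).Sublist (t.map Prod.fst) :=
    List.Sublist.map Prod.fst (List.filter_sublist (l := t))
  rw [PySem.Set.ofList_eq_self_of_nodup _ (hsub.nodup hnd)]
  rw [List.length_map, ← List.countP_eq_length_filter]
  simp [List.count, List.countP_map, Function.comp_def]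

theorem diff_optima_eq (tallies_by_element : List (String × Int))
    (hnd : (tallies_by_element.map Prod.fst).Nodup)
    (hlen : 2 ≤ tallies_by_element.length) :
    diff_optima tallies_by_element = diff_optima_alt tallies_by_element := by
  obtain ⟨⟨k0, v0⟩, t', rfl⟩ : ∃ p t', tallies_by_element = p :: t' := by
    cases tallies_by_element with
    | nil => simp at hlen
    | cons p t' => exact ⟨p, t', rfl⟩
  have hguard : ¬ ((k0, v0) :: t').length < 2 := by omega
  set vs := t'.map Prod.snd with hvs
  have hmap : ((k0, v0) :: t').map Prod.snd = v0 :: vs := by simp [hvs]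
  set M := vs.foldl max v0 with hM
  set m := vs.foldl min v0 with hm
  -- B side
  have hB : diff_optima_alt ((k0, v0) :: t') =
      (if ((v0 :: vs).count M : Int) ≠ 1 then 0
       else if ((v0 :: vs).count m : Int) ≠ 1 then 0 else M - m) := by
    unfold diff_optima_alt
    rw [if_neg hguard, hmap]
    rw [PySem.List.foldl_prod_mk pvMaxStep pvMinStep]
    simp only [List.foldl_cons]
    have h1 : pvMaxStep (0, 0) v0 = (v0, 1) := by simp [pvMaxStep]
    have h2 : pvMinStep (0, 0) v0 = (v0, 1) := by simp [pvMinStep]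
    rw [h1, h2, pvMaxStep_foldl vs v0 1 one_pos, pvMinStep_foldl vs v0 1 one_pos]
    have hcM : (vs.count M : Int) + (if v0 = M then (1 : Int) else 0) = ((v0 :: vs).count M : Int) := by
      by_cases hv : v0 = M <;> simp [hv]
    have hcm : (vs.count m : Int) + (if v0 = m then (1 : Int) else 0) = ((v0 :: vs).count m : Int) := by
      by_cases hv : v0 = m <;> simp [hv]
    simp only [← hM, ← hm, hcM, hcm]
  -- A side
  have hA : diff_optima ((k0, v0) :: t') =
      (if ((v0 :: vs).count M) ≠ 1 then 0
       else if ((v0 :: vs).count m) ≠ 1 then 0 else M - m) := by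
    unfold diff_optima
    rw [if_neg hguard]
    rw [show (((k0, v0) :: t').map Prod.snd) = v0 :: vs from hmap]
    rw [PySem.List.max?_id_cons, PySem.List.min?_id_cons]
    simp only [← hM, ← hm]
    rw [pvTopLength _ hnd M, pvTopLength _ hnd m, hmap]
  rw [hA, hB]
  split_ifs <;> first | rfl | (exfalso; omega)

-- ===== VERDICT (by name: the statement is the Claim_ definition above) =====
theorem diff_optima_spec : Claim_equal_diff_optima := by
  intro t _ hpre
  obtain ⟨hnd, hlen, -, -⟩ := hpre
  exact diff_optima_eq t hnd hlen
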